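-- pv_equiv track=rewrite | github.com/R-Bread/True-RNG-Arduino | tests.py | makeByteStringArray
-- ===== SOURCE A (Python) =====
-- def makeByteStringArray(bitsArray):
-- 	newArray = []
-- 	for i in range(len(bitsArray)//8):
-- 		temp = ""
-- 		for j in range(8):
-- 			temp += str(bitsArray[8*i+j])
-- 		newArray.append(temp)
-- 	return newArray
-- ===== SOURCE B (Python) =====
-- def makeByteStringArray(bitsArray):
--     newArray = []
--     group = []
--     for b in bitsArray:
--         group.append(str(b))
--         if len(group) == 8:
--             newArray.append("".join(group))
--             group = []
--     return newArray
-- ===== Notes on version B (the rewrite author's own statement) =====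
-- stated objective: alternative
-- what changed: Replaces A's nested index loops (outer over range(n//8), inner over range(8) indexing bitsArray[8*i+j] into a += string accumulator) with a single pass over the elements that collects str() forms into a group list and emits ''.join(group) whenever the group reaches 8, with no index arithmetic and no length//8 precomputation.
import Mathlib
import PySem

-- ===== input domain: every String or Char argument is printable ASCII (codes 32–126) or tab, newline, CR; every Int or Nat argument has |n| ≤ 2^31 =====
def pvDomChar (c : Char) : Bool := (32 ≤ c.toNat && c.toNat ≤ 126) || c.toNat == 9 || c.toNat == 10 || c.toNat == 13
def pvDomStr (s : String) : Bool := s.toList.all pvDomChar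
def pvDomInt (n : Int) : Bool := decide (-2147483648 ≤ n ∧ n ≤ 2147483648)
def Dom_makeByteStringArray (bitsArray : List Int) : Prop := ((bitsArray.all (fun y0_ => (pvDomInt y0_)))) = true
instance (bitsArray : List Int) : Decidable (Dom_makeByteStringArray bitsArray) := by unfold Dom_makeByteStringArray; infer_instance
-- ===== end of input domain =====

-- B replaces A's nested index loops (range(n//8) × range(8), bitsArray[8*i+j] into a += accumulator)
-- with one pass that collects str() forms into a group and emits ''.join(group) at size 8 (objective: alternative).

-- ===== PORT A =====
def makeByteStringArray (bitsArray : List Int) : List String :=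
  (PySem.List.pyRange 0 (PySem.Int.floordiv (bitsArray.length : Int) 8) 1).foldl
    (fun newArray i =>
      newArray ++ [(PySem.List.pyRange 0 8 1).foldl
        (fun temp j => temp ++ PySem.Int.toStr (PySem.List.pyGetD bitsArray (8 * i + j) 0)) ""])
    []

-- ===== PORT B =====
-- loop body of B's for-loop (group.append(str(b)); emit at size 8)
def altStep (s : List String × List String) (b : Int) : List String × List String :=
  let group := s.2 ++ [PySem.Int.toStr b]
  if group.length = 8 then (s.1 ++ [PySem.Str.join "" group], []) else (s.1, group)

def makeByteStringArray_alt (bitsArray : List Int) : List String :=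
  (bitsArray.foldl altStep ([], [])).1

-- ===== PRECONDITION & SPEC =====
def Spec_makeByteStringArray (bitsArray : List Int) (out : List String) : Prop := out = makeByteStringArray_alt bitsArray
instance (bitsArray : List Int) (out : List String) : Decidable (Spec_makeByteStringArray bitsArray out) := by unfold Spec_makeByteStringArray; infer_instance

-- ===== CLAIM (what is proved, stated in full; the proofs are below) =====
def Claim_equal_makeByteStringArray : Prop := ∀ (bitsArray : List Int), Dom_makeByteStringArray bitsArray → Spec_makeByteStringArray bitsArray (makeByteStringArray bitsArray)

-- ===== LEMMAS AND PROOFS =====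

-- canonical form both ports are reduced to: join the str() forms of each full group of 8
def chunks : List Int → List String
  | a0 :: a1 :: a2 :: a3 :: a4 :: a5 :: a6 :: a7 :: rest =>
      PySem.Str.join "" ([a0, a1, a2, a3, a4, a5, a6, a7].map PySem.Int.toStr) :: chunks rest
  | _ => []

lemma short_cases (t : List Int)
    (h : ∀ (a0 a1 a2 a3 a4 a5 a6 a7 : Int) (rest : List Int),
      t = a0 :: a1 :: a2 :: a3 :: a4 :: a5 :: a6 :: a7 :: rest → False) :
    chunks t = [] ∧ t.length < 8 := by
  rcases t with _|⟨a0,_|⟨a1,_|⟨a2,_|⟨a3,_|⟨a4,_|⟨a5,_|⟨a6,_|⟨a7,rest⟩⟩⟩⟩⟩⟩⟩⟩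
  · exact ⟨rfl, by simp⟩
  · exact ⟨rfl, by simp⟩
  · exact ⟨rfl, by simp⟩
  · exact ⟨rfl, by simp⟩
  · exact ⟨rfl, by simp⟩
  · exact ⟨rfl, by simp⟩
  · exact ⟨rfl, by simp⟩
  · exact ⟨rfl, by simp⟩
  · exact (h a0 a1 a2 a3 a4 a5 a6 a7 rest rfl).elim

lemma altStep_lt (na g : List String) (b : Int) (h : g.length ≠ 7) :
    altStep (na, g) b = (na, g ++ [PySem.Int.toStr b]) := by
  simp only [altStep, List.length_append, List.length_singleton]
  rw [if_neg (by omega)]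

lemma altStep_full (na g : List String) (b : Int) (h : g.length = 7) :
    altStep (na, g) b = (na ++ [PySem.Str.join "" (g ++ [PySem.Int.toStr b])], []) := by
  simp only [altStep, List.length_append, List.length_singleton]
  rw [if_pos (by omega)]

lemma alt_foldl_eq_chunks : ∀ (xs : List Int) (na : List String),
    (xs.foldl altStep (na, [])).1 = na ++ chunks xs := by
  intro xs
  induction xs using chunks.induct with
  | case1 a0 a1 a2 a3 a4 a5 a6 a7 rest ih =>
      intro na
      rw [List.foldl_cons, altStep_lt _ _ _ (by simp),
          List.foldl_cons, altStep_lt _ _ _ (by simp),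
          List.foldl_cons, altStep_lt _ _ _ (by simp),
          List.foldl_cons, altStep_lt _ _ _ (by simp),
          List.foldl_cons, altStep_lt _ _ _ (by simp),
          List.foldl_cons, altStep_lt _ _ _ (by simp),
          List.foldl_cons, altStep_lt _ _ _ (by simp),
          List.foldl_cons, altStep_full _ _ _ (by simp),
          ih, chunks]
      simp
  | case2 t h =>
      intro na
      obtain ⟨hc, hl⟩ := short_cases t h
      rw [hc, List.append_nil]
      rcases t with _|⟨a0,_|⟨a1,_|⟨a2,_|⟨a3,_|⟨a4,_|⟨a5,_|⟨a6,_|⟨a7,rest⟩⟩⟩⟩⟩⟩⟩⟩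
      · rfl
      · simp [List.foldl, altStep]
      · simp [List.foldl, altStep]
      · simp [List.foldl, altStep]
      · simp [List.foldl, altStep]
      · simp [List.foldl, altStep]
      · simp [List.foldl, altStep]
      · simp [List.foldl, altStep]
      · simp at hl; omega

lemma shift8 (a0 a1 a2 a3 a4 a5 a6 a7 : Int) (rest : List Int) (i : Int) (h : 0 ≤ i) :
    PySem.List.pyGetD (a0::a1::a2::a3::a4::a5::a6::a7::rest) (i+8) 0 = PySem.List.pyGetD rest i 0 := by
  obtain ⟨n, rfl⟩ := Int.eq_ofNat_of_zero_le h
  have h1 : ((n:Int)+8) = ((n+8 : Nat):Int) := by push_cast; ring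
  have h2 : n+8 = (((((((n+1)+1)+1)+1)+1)+1)+1)+1 := by omega
  rw [h1, PySem.List.pyGetD_natCast, PySem.List.pyGetD_natCast, h2]
  simp

set_option maxHeartbeats 1000000 in
lemma mapRange_eq_chunks : ∀ (xs : List Int),
    (List.range (xs.length / 8)).map (fun k : Nat =>
      List.foldl
        (fun temp j => temp ++ PySem.Int.toStr (PySem.List.pyGetD xs (8 * (k:Int) + j) 0)) ""
        [0,1,2,3,4,5,6,7]) = chunks xs := by
  intro xs
  induction xs using chunks.induct with
  | case1 a0 a1 a2 a3 a4 a5 a6 a7 rest ih =>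
      have hlen : (a0::a1::a2::a3::a4::a5::a6::a7::rest).length / 8 = rest.length / 8 + 1 := by
        simp; omega
      rw [hlen, List.range_succ_eq_map, List.map_cons, List.map_map, chunks]
      refine congr_arg₂ List.cons ?_ ?_
      · apply String.toList_inj.mp
        simp [List.foldl, PySem.Str.toList_join, PySem.Chars.join_cons_cons,
              PySem.Chars.join_singleton, PySem.List.pyGetD_ofNat']
      · rw [← ih]
        apply List.map_congr_left
        intro k _
        simp only [Function.comp_apply]
        apply List.foldl_ext
        intro acc x hx
        have hx0 : (0:Int) ≤ x := by simp at hx; omega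
        have he : 8*((k+1 : Nat):Int)+x = (8*(k:Int)+x)+8 := by push_cast; ring
        rw [he, shift8 a0 a1 a2 a3 a4 a5 a6 a7 rest (8*(k:Int)+x) (by omega)]
  | case2 t h =>
      obtain ⟨hc, hl⟩ := short_cases t h
      rw [hc]
      have : t.length / 8 = 0 := by omega
      rw [this, List.range_zero, List.map_nil]

lemma A_eq_chunks (xs : List Int) : makeByteStringArray xs = chunks xs := by
  have hr8 : PySem.List.pyRange 0 8 1 = [0,1,2,3,4,5,6,7] := by decide
  rw [makeByteStringArray]
  simp only [hr8]
  rw [PySem.List.foldl_append_singleton_eq_map, List.nil_append]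
  have hk : PySem.Int.floordiv (xs.length : Int) 8 = ((xs.length / 8 : Nat) : Int) := by
    exact_mod_cast PySem.Int.floordiv_natCast xs.length 8
  rw [hk, PySem.List.pyRange_one, List.map_map]
  rw [← mapRange_eq_chunks xs]
  apply List.map_congr_left
  intro k hk2
  simp

-- ===== VERDICT (by name: the statement is the Claim_ definition above) =====
theorem makeByteStringArray_spec : Claim_equal_makeByteStringArray := by
  intro xs _
  show makeByteStringArray xs = makeByteStringArray_alt xs
  rw [A_eq_chunks, makeByteStringArray_alt, alt_foldl_eq_chunks, List.nil_append]
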